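-- pv_equiv track=rewrite | github.com/josh-holder/linegame | LineGame.py | findPrevBoards
-- ===== SOURCE A (Python) =====
-- from itertools import combinations
--
-- def convertBoardToList(board):
--     """
--     i.e. Converts a board with a row of 3 lines and two rows of 1 line from the form:
--     {3:1,1:2}
--     to
--     [3, 1, 1]
--     """
--     board_list = []
--     for row, num_rows in board.items():
--         for i in range(num_rows):
--             board_list.append(row)
--
--     return board_list
--
-- def findPrevBoards(board, largest_row, add_factor=0, use_add_factor=False):
--     """
--     Given a board state and the largest row in the initial board, returns a list of possible boards that could have preceded the board state.
--
--     INPUTS -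
--     -<dict> board, boardgame in dictionary form as output by convertBoardToDict
--     -<int> largest_row, the largest row in the initial board which bounds the maximum size of the previous rows
--     OUTPUTS -
--     -<list of dicts> previous boards that could've led to the forced loss, in dictionary form
--     """
--
--     previous_boards = []
--
--     #creates [loss, y] forced win - forced wins by adding an entirely new row to the board
--     for i in range(1,largest_row+1):
--         prev_board = dict(board) #copy board
--
--         #if theres already a row of size i in the board, add another one. Otherwise, add a new row with a value of 1
--         prev_board.setdefault(i,0)
--         prev_board[i] += 1
--
--         previous_boards.append(prev_board)
--
--     #creates [x] forced win - forced wins by adding more lines to each existing row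
--     #iterates over each line in the loss
--     for line in board:
--         #iterates from (the digit+1) to the highest number
--         for i in range(line+1, largest_row+1):
--
--             #removes old number, adds new numbers
--             prev_board = dict(board)
--
--             #removes values from the one you're turning into x
--             if prev_board[line] > 1:
--                 prev_board[line] -= 1
--             else:
--                 prev_board.pop(line)
--
--             #if i is not a key in the dictionary, set it to 0. Then add 1 of these types of lines to the board
--             prev_board.setdefault(i,0)
--             prev_board[i] += 1;
--
--             previous_boards.append(prev_board)
--
--     #creates previous boards which got to the current board by splitting an earlier one
--     combinations_of_rows = combinations(convertBoardToList(board), 2)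
--     combos_checked = set()
--     for rows in combinations_of_rows:
--         rows_set = frozenset(rows)
--
--         #Only check if this combo hasn't been added before
--         if rows_set not in combos_checked:
--             combos_checked.add(rows_set)
--
--             min_size_of_containing_row = sum(rows) + 1
--             for i in range(min_size_of_containing_row,largest_row):
--                 prev_board = dict(board)
--
--                 prev_board[rows[0]] -= 1
--                 prev_board[rows[1]] -= 1
--
--                 prev_board.setdefault(i,0)
--                 prev_board[i] += 1
--
--                 previous_boards.append(prev_board)
--
--     return previous_boards
-- ===== SOURCE B (Python) =====
-- def findPrevBoards(board, largest_row, add_factor=0, use_add_factor=False):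
--     def with_row(d, i):
--         e = dict(d)
--         e[i] = e.get(i, 0) + 1
--         return e
--
--     out = [with_row(board, i) for i in range(1, largest_row + 1)]
--
--     for line in board:
--         base = dict(board)
--         if base[line] > 1:
--             base[line] -= 1
--         else:
--             del base[line]
--         out += [with_row(base, i) for i in range(line + 1, largest_row + 1)]
--
--     # distinct unordered pairs of rows, in first-occurrence order of the
--     # multiset expansion, enumerated directly over the (distinct) keys
--     keep = [(r, c) for r, c in board.items() if c >= 1]
--     for j, (r1, c1) in enumerate(keep):
--         pairs = ([(r1, r1)] if c1 >= 2 else []) + [(r1, r2) for r2, _ in keep[j + 1:]]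
--         for a, b in pairs:
--             base = dict(board)
--             base[a] -= 1
--             base[b] -= 1
--             out += [with_row(base, i) for i in range(a + b + 1, largest_row)]
--     return out
-- ===== Notes on version B (the rewrite author's own statement) =====
-- stated objective: alternative
-- what changed: Phase 3 no longer expands the board into its multiset of individual lines and scans all itertools.combinations pairs through a frozenset seen-set; it enumerates each distinct unordered pair of row sizes exactly once, directly over the distinct keys in first-occurrence order (phases 1-2 become comprehensions with the per-row base dict hoisted out of the inner loop); this trades the O(n^2) pair scan (n = total line count) for an O(k^2) one (k = distinct row sizes), which pays off only when rows repeat.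
import Mathlib
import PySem

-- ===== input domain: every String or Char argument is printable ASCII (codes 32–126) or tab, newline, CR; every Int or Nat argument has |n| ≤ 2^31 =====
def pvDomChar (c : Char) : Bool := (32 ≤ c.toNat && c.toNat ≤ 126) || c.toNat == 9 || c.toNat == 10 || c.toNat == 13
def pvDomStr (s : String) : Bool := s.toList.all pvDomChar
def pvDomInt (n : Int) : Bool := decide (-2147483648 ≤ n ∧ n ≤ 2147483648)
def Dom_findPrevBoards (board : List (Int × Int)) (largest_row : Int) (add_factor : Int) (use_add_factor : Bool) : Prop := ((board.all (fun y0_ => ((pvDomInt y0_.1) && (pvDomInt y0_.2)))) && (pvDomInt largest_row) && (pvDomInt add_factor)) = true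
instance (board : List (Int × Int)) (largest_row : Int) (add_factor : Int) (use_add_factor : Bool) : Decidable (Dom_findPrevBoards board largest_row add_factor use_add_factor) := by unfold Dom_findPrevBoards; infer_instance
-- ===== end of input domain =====

-- B enumerates each distinct unordered pair of row sizes exactly once, directly over the distinct
-- keys in first-occurrence order, instead of A's pass over all itertools.combinations of the
-- expanded line list deduplicated through a frozenset seen-set; phases 1-2 become comprehensions
-- with the per-row base dict hoisted out of the inner loop. Return values are proved equal for
-- every dict-shaped board (distinct keys).

-- ===== PORT A =====

-- prev_board.setdefault(i, 0); prev_board[i] += 1   (the key is present after setdefault, so the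
-- total modify with default 0 is exact)
def pvBumpA (d : PySem.Dict Int Int) (i : Int) : PySem.Dict Int Int :=
  (d.setdefault i 0).modify i 0 (· + 1)

-- convertBoardToList: for row, num_rows in board.items(): for i in range(num_rows): append row
def pvConvertBoardToList (d : PySem.Dict Int Int) : List Int :=
  d.items.foldl (fun bl rn => (PySem.List.pyRange 0 rn.2 1).foldl (fun bl2 _ => bl2 ++ [rn.1]) bl) []

-- itertools.combinations(xs, 2), in itertools' order
def pvCombos2 : List Int → List (Int × Int)
  | [] => []
  | x :: xs => xs.map (fun y => (x, y)) ++ pvCombos2 xs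

-- frozenset(rows) for a 2-tuple of ints, represented canonically (exact: equality of the
-- frozensets {a,b} is unordered-pair equality)
def pvFrozen (p : Int × Int) : Int × Int := if p.1 ≤ p.2 then p else (p.2, p.1)

-- NOTE on dict lookups: `prev_board[line]` / `prev_board[rows[0]]` index keys that are present
-- (they come from the board itself), so the total getD/modify-with-default forms are exact.
def findPrevBoards (board : List (Int × Int)) (largest_row : Int) (add_factor : Int) (use_add_factor : Bool) : List (List (Int × Int)) :=
  let d0 : PySem.Dict Int Int := ⟨board⟩
  -- first loop: for i in range(1, largest_row+1)
  let pb1 := (PySem.List.pyRange 1 (largest_row + 1) 1).foldl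
      (fun acc i => acc ++ [(pvBumpA d0 i).items]) []
  -- second loop: for line in board: for i in range(line+1, largest_row+1)
  let pb2 := d0.keys.foldl
      (fun acc line => (PySem.List.pyRange (line + 1) (largest_row + 1) 1).foldl
          (fun acc2 i =>
            let prev := if 1 < d0.getD line 0 then d0.modify line 0 (· - 1) else d0.erase line
            acc2 ++ [(pvBumpA prev i).items]) acc) pb1
  -- third loop: combinations + frozenset seen-set
  let st := (pvCombos2 (pvConvertBoardToList d0)).foldl
      (fun (st : PySem.Set (Int × Int) × List (List (Int × Int))) rows =>
        let rs := pvFrozen rows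
        if PySem.Set.contains st.1 rs then st
        else
          let checked := PySem.Set.add st.1 rs
          let min_size := rows.1 + rows.2 + 1
          let boards := (PySem.List.pyRange min_size largest_row 1).foldl
            (fun acc2 i =>
              let prev := (d0.modify rows.1 0 (· - 1)).modify rows.2 0 (· - 1)
              acc2 ++ [(pvBumpA prev i).items]) st.2
          (checked, boards))
      (PySem.Set.empty, pb2)
  st.2

-- ===== PORT B =====

-- with_row: e = dict(d); e[i] = e.get(i, 0) + 1
def pvWithRow (d : PySem.Dict Int Int) (i : Int) : PySem.Dict Int Int :=
  d.insert i (d.getD i 0 + 1)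

-- the distinct unordered pairs, enumerated directly: for j,(r1,c1) in enumerate(keep):
--   ([(r1,r1)] if c1>=2 else []) + [(r1,r2) for r2,_ in keep[j+1:]]
def pvPairsB : List (Int × Int) → List (Int × Int)
  | [] => []
  | (r, c) :: rest =>
      ((if 2 ≤ c then [(r, r)] else []) ++ rest.map (fun q => (r, q.1))) ++ pvPairsB rest

def findPrevBoards_alt (board : List (Int × Int)) (largest_row : Int) (add_factor : Int) (use_add_factor : Bool) : List (List (Int × Int)) :=
  let d0 : PySem.Dict Int Int := ⟨board⟩
  let out1 := (PySem.List.pyRange 1 (largest_row + 1) 1).map (fun i => (pvWithRow d0 i).items)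
  let out2 := d0.keys.flatMap (fun line =>
      let base := if 1 < d0.getD line 0 then d0.modify line 0 (· - 1) else d0.erase line
      (PySem.List.pyRange (line + 1) (largest_row + 1) 1).map (fun i => (pvWithRow base i).items))
  let keep := d0.items.filter (fun rc => decide (1 ≤ rc.2))
  let out3 := (pvPairsB keep).flatMap (fun ab =>
      let base := (d0.modify ab.1 0 (· - 1)).modify ab.2 0 (· - 1)
      (PySem.List.pyRange (ab.1 + ab.2 + 1) largest_row 1).map (fun i => (pvWithRow base i).items))
  out1 ++ out2 ++ out3

-- ===== PRECONDITION & SPEC =====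
-- Pre_ excludes association lists with a repeated key: they do not represent any Python dict
-- (the board argument is a dict, whose keys are distinct), so A's behaviour on them is claimed
-- about nothing real; no input A runs on is excluded.
def Pre_findPrevBoards (board : List (Int × Int)) (largest_row : Int) (add_factor : Int) (use_add_factor : Bool) : Prop :=
  (board.map Prod.fst).Nodup
instance (board : List (Int × Int)) (largest_row : Int) (add_factor : Int) (use_add_factor : Bool) : Decidable (Pre_findPrevBoards board largest_row add_factor use_add_factor) := by unfold Pre_findPrevBoards; infer_instance

def pvWitness_findPrevBoards : (List (Int × Int)) × Int × Int × Bool := ([(3, 1), (1, 2)], 3, 0, false)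

def Spec_findPrevBoards (board : List (Int × Int)) (largest_row : Int) (add_factor : Int) (use_add_factor : Bool) (out : List (List (Int × Int))) : Prop := out = findPrevBoards_alt board largest_row add_factor use_add_factor
instance (board : List (Int × Int)) (largest_row : Int) (add_factor : Int) (use_add_factor : Bool) (out : List (List (Int × Int))) : Decidable (Spec_findPrevBoards board largest_row add_factor use_add_factor out) := by unfold Spec_findPrevBoards; infer_instance

-- ===== CLAIM (what is proved, stated in full; the proofs are below) =====
def Claim_equal_findPrevBoards : Prop := ∀ (board : List (Int × Int)) (largest_row : Int) (add_factor : Int) (use_add_factor : Bool), Dom_findPrevBoards board largest_row add_factor use_add_factor → Pre_findPrevBoards board largest_row add_factor use_add_factor → Spec_findPrevBoards board largest_row add_factor use_add_factor (findPrevBoards board largest_row add_factor use_add_factor)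

-- ===== LEMMAS AND PROOFS =====

theorem pvBump_eq (d : PySem.Dict Int Int) (i : Int) : pvBumpA d i = pvWithRow d i := by
  unfold pvBumpA pvWithRow
  by_cases h : d.contains i = true
  · rw [PySem.Dict.setdefault_of_contains d 0 h]; rfl
  · have h' : d.contains i = false := by simpa using h
    rw [PySem.Dict.setdefault_of_not_contains d 0 h']
    rw [PySem.Dict.modify, PySem.Dict.getD_insert_self, PySem.Dict.insert_insert_self,
      PySem.Dict.getD_of_not_contains d 0 h']

-- the multiset expansion of the board, block-wise
def pvExpand (l : List (Int × Int)) : List Int :=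
  l.flatMap (fun rc => List.replicate rc.2.toNat rc.1)

theorem pvConvert_eq (d : PySem.Dict Int Int) : pvConvertBoardToList d = pvExpand d.items := by
  unfold pvConvertBoardToList pvExpand
  have h : ∀ (rn : Int × Int) (bl : List Int),
      (PySem.List.pyRange 0 rn.2 1).foldl (fun bl2 _ => bl2 ++ [rn.1]) bl
        = bl ++ List.replicate rn.2.toNat rn.1 := by
    intro rn bl
    rw [PySem.List.foldl_append_singleton_eq_map (fun _ => rn.1)]
    simp [List.map_const']
  calc d.items.foldl (fun bl rn => (PySem.List.pyRange 0 rn.2 1).foldl (fun bl2 _ => bl2 ++ [rn.1]) bl) []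
      = d.items.foldl (fun bl rn => bl ++ List.replicate rn.2.toNat rn.1) [] := by
        apply PySem.List.foldl_congr_mem; intro bl rn _; exact h rn bl
    _ = _ := by
        rw [PySem.List.foldl_append_eq_flatMap]; rfl

-- first-occurrence dedup of the combination stream by frozenset, extracted from A's loop
def pvDdl : List (Int × Int) → PySem.Set (Int × Int) → List (Int × Int)
  | [], _ => []
  | p :: ps, s =>
      if PySem.Set.contains s (pvFrozen p) then pvDdl ps s
      else p :: pvDdl ps (PySem.Set.add s (pvFrozen p))

-- boards generated for one (deduplicated) pair of rows
def pvGb (d0 : PySem.Dict Int Int) (largest_row : Int) (ab : Int × Int) : List (List (Int × Int)) :=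
  (PySem.List.pyRange (ab.1 + ab.2 + 1) largest_row 1).map
    (fun i => (pvWithRow ((d0.modify ab.1 0 (· - 1)).modify ab.2 0 (· - 1)) i).items)

theorem pvPhase3_foldl (d0 : PySem.Dict Int Int) (largest_row : Int) :
    ∀ (ps : List (Int × Int)) (s : PySem.Set (Int × Int)) (acc : List (List (Int × Int))),
    (ps.foldl
      (fun (st : PySem.Set (Int × Int) × List (List (Int × Int))) rows =>
        let rs := pvFrozen rows
        if PySem.Set.contains st.1 rs then st
        else
          let checked := PySem.Set.add st.1 rs
          let min_size := rows.1 + rows.2 + 1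
          let boards := (PySem.List.pyRange min_size largest_row 1).foldl
            (fun acc2 i =>
              let prev := (d0.modify rows.1 0 (· - 1)).modify rows.2 0 (· - 1)
              acc2 ++ [(pvBumpA prev i).items]) st.2
          (checked, boards)) (s, acc)).2
    = acc ++ (pvDdl ps s).flatMap (pvGb d0 largest_row) := by
  intro ps
  induction ps with
  | nil => intro s acc; simp [pvDdl]
  | cons p ps ih =>
    intro s acc
    simp only [List.foldl_cons, pvDdl]
    by_cases h : PySem.Set.contains s (pvFrozen p) = true
    · simp only [h, if_true]
      exact ih s acc
    · simp only [eq_false_of_ne_true h, if_false, Bool.false_eq_true]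
      rw [ih]
      have hb : (PySem.List.pyRange (p.1 + p.2 + 1) largest_row 1).foldl
          (fun acc2 i =>
            acc2 ++ [(pvBumpA ((d0.modify p.1 0 (· - 1)).modify p.2 0 (· - 1)) i).items]) acc
          = acc ++ pvGb d0 largest_row p := by
        rw [PySem.List.foldl_append_singleton_eq_map
          (fun i => (pvBumpA ((d0.modify p.1 0 (· - 1)).modify p.2 0 (· - 1)) i).items)]
        simp [pvGb, pvBump_eq]
      simp only [List.flatMap_cons, hb, List.append_assoc]

-- "emitted so far" bookkeeping for the first-occurrence dedup of one map block
def pvNewOnes : List Int → List Int → List Int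
  | [], _ => []
  | y :: M, em => if y ∈ em then pvNewOnes M em else y :: pvNewOnes M (y :: em)

theorem pvFrozen_snd_inj {r y y' : Int} (h : pvFrozen (r, y) = pvFrozen (r, y')) : y = y' := by
  unfold pvFrozen at h; split_ifs at h <;>
    simp only [Prod.mk.injEq] at h <;> omega

theorem pvFrozen_comp {a b c d : Int} (h : pvFrozen (a, b) = pvFrozen (c, d)) :
    (a = c ∧ b = d) ∨ (a = d ∧ b = c) := by
  unfold pvFrozen at h; split_ifs at h <;>
    simp only [Prod.mk.injEq] at h <;> omega

theorem pvDdl_append_seen {xs : List (Int × Int)} {s : PySem.Set (Int × Int)}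
    (h : ∀ p ∈ xs, pvFrozen p ∈ s) (ys : List (Int × Int)) :
    pvDdl (xs ++ ys) s = pvDdl ys s := by
  induction xs with
  | nil => rfl
  | cons p xs ih =>
    have hc : PySem.Set.contains s (pvFrozen p) = true :=
      (PySem.Set.contains_iff s _).2 (h p (by simp))
    simp only [List.cons_append, pvDdl, hc, if_true]
    exact ih (fun q hq => h q (by simp [hq]))

theorem pvDdl_map_block (r : Int) :
    ∀ (M : List Int) (em : List Int) (s : PySem.Set (Int × Int)) (K : List (Int × Int)),
    (∀ y ∈ M, (pvFrozen (r, y) ∈ s ↔ y ∈ em)) →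
    pvDdl (M.map (fun y => (r, y)) ++ K) s
      = (pvNewOnes M em).map (fun y => (r, y))
        ++ pvDdl K (s ++ (pvNewOnes M em).map (fun y => pvFrozen (r, y))) := by
  intro M
  induction M with
  | nil => intro em s K _; simp [pvNewOnes]
  | cons y M ih =>
    intro em s K h
    by_cases hy : y ∈ em
    · have hs : pvFrozen (r, y) ∈ s := (h y (by simp)).2 hy
      have hc : PySem.Set.contains s (pvFrozen (r, y)) = true :=
        (PySem.Set.contains_iff s _).2 hs
      simp only [List.map_cons, List.cons_append, pvDdl, hc, if_true, pvNewOnes, hy, if_true]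
      exact ih em s K (fun z hz => h z (by simp [hz]))
    · have hs : pvFrozen (r, y) ∉ s := fun hin => hy ((h y (by simp)).1 hin)
      have hc : ¬ PySem.Set.contains s (pvFrozen (r, y)) = true := by
        rw [PySem.Set.contains_iff]; exact hs
      simp only [List.map_cons, List.cons_append, pvDdl, eq_false_of_ne_true hc, if_false,
        Bool.false_eq_true, pvNewOnes, hy, if_false]
      rw [PySem.Set.add_of_not_mem hs]
      rw [ih (y :: em) (s ++ [pvFrozen (r, y)]) K ?_]
      · simp [List.append_assoc]
      · intro z hz
        constructor
        · intro hin
          rcases List.mem_append.1 hin with h1 | h2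
          · exact List.mem_cons_of_mem _ ((h z (by simp [hz])).1 h1)
          · simp only [List.mem_singleton] at h2
            simp [pvFrozen_snd_inj h2]
        · intro hin
          rcases List.mem_cons.1 hin with h1 | h2
          · subst h1; simp
          · exact List.mem_append.2 (Or.inl ((h z (by simp [hz])).2 h2))

theorem pvNewOnes_replicate_skip {r : Int} {em : List Int} (h : r ∈ em) :
    ∀ (n : Nat) (M : List Int), pvNewOnes (List.replicate n r ++ M) em = pvNewOnes M em := by
  intro n
  induction n with
  | zero => intro M; rfl
  | succ n ih => intro M; simp only [List.replicate_succ, List.cons_append, pvNewOnes, h, if_true]; exact ih M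

theorem pvMem_expand {y : Int} : ∀ {l : List (Int × Int)}, y ∈ pvExpand l → y ∈ l.map Prod.fst := by
  intro l hy
  simp only [pvExpand, List.mem_flatMap] at hy
  obtain ⟨rc, hrc, hmem⟩ := hy
  rw [List.eq_of_mem_replicate hmem]
  exact List.mem_map_of_mem hrc

theorem pvNewOnes_expand :
    ∀ (keep : List (Int × Int)) (em : List Int),
    (keep.map Prod.fst).Nodup → (∀ rc ∈ keep, 1 ≤ rc.2) → (∀ rc ∈ keep, rc.1 ∉ em) →
    pvNewOnes (pvExpand keep) em = keep.map Prod.fst := by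
  intro keep
  induction keep with
  | nil => intro em _ _ _; rfl
  | cons rc rest ih =>
    intro em hnd hc hem
    obtain ⟨r, c⟩ := rc
    have h1 : 1 ≤ c := hc (r, c) (by simp)
    have hn : c.toNat = (c.toNat - 1) + 1 := by omega
    simp only [pvExpand, List.flatMap_cons]
    rw [hn, List.replicate_succ]
    have hrem : r ∉ em := hem (r, c) (by simp)
    simp only [List.cons_append, pvNewOnes, hrem, if_false]
    rw [pvNewOnes_replicate_skip (by simp) _ _]
    rw [show (List.flatMap (fun rc => List.replicate rc.2.toNat rc.1) rest) = pvExpand rest from rfl]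
    rw [ih (r :: em) (by simpa using hnd.sublist (by simp)) (fun q hq => hc q (by simp [hq])) ?_]
    · simp
    · intro q hq
      simp only [List.mem_cons, not_or]
      refine ⟨?_, hem q (by simp [hq])⟩
      intro hqr
      have : q.1 ∈ rest.map Prod.fst := List.mem_map_of_mem hq
      simp only [List.map_cons, List.nodup_cons] at hnd
      exact hnd.1 (hqr ▸ this)

theorem pvDdl_combos_replicate {r : Int} :
    ∀ (m : Nat) (M : List Int) (s : PySem.Set (Int × Int)),
    (2 ≤ m → pvFrozen (r, r) ∈ s) → (∀ y ∈ M, pvFrozen (r, y) ∈ s) →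
    pvDdl (pvCombos2 (List.replicate m r ++ M)) s = pvDdl (pvCombos2 M) s := by
  intro m
  induction m with
  | zero => intro M s _ _; rfl
  | succ m ih =>
    intro M s h2 hM
    rw [List.replicate_succ, List.cons_append]
    show pvDdl ((List.replicate m r ++ M).map (fun y => (r, y)) ++ pvCombos2 (List.replicate m r ++ M)) s = _
    rw [pvDdl_append_seen ?_ _]
    · exact ih M s (fun hm => h2 (by omega)) hM
    · intro p hp
      simp only [List.mem_map] at hp
      obtain ⟨y, hy, rfl⟩ := hp
      rcases List.mem_append.1 hy with h1 | h1
      · rw [List.eq_of_mem_replicate h1]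
        exact h2 (by
          have := List.length_pos_of_mem h1
          simp at this; omega)
      · exact hM y h1

theorem pvDdl_combos_main :
    ∀ (keep : List (Int × Int)) (s : PySem.Set (Int × Int)),
    (keep.map Prod.fst).Nodup → (∀ rc ∈ keep, 1 ≤ rc.2) →
    (∀ a b : Int, a ∈ keep.map Prod.fst → b ∈ keep.map Prod.fst → pvFrozen (a, b) ∉ s) →
    pvDdl (pvCombos2 (pvExpand keep)) s = pvPairsB keep := by
  intro keep
  induction keep with
  | nil => intro s _ _ _; rfl
  | cons rc rest ih =>
    intro s hnd hc hs
    obtain ⟨r, c⟩ := rc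
    have h1 : 1 ≤ c := hc (r, c) (by simp)
    have hn1 : c.toNat = (c.toNat - 1) + 1 := by omega
    have hndr : (rest.map Prod.fst).Nodup := by simpa using hnd.sublist (by simp)
    have hrnotin : r ∉ rest.map Prod.fst := by
      simp only [List.map_cons, List.nodup_cons] at hnd; exact hnd.1
    set M := pvExpand rest with hM
    set T := List.replicate (c.toNat - 1) r ++ M with hT
    have hexp : pvExpand ((r, c) :: rest) = r :: T := by
      simp only [pvExpand, List.flatMap_cons]
      rw [hn1, List.replicate_succ]
      rfl
    have hMkeys : ∀ y ∈ M, y ∈ rest.map Prod.fst := fun y hy => pvMem_expand hy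
    have hTkeys : ∀ y ∈ T, y = r ∨ y ∈ rest.map Prod.fst := by
      intro y hy
      rcases List.mem_append.1 hy with h' | h'
      · exact Or.inl (List.eq_of_mem_replicate h')
      · exact Or.inr (hMkeys y h')
    have hside : ∀ y ∈ T, pvFrozen (r, y) ∈ s ↔ y ∈ ([] : List Int) := by
      intro y hy
      simp only [List.not_mem_nil, iff_false]
      rcases hTkeys y hy with h' | h'
      · rw [h']
        exact hs r r (by simp) (by simp)
      · exact hs r y (by simp) (by simp [h'])
    have hNT : pvNewOnes T [] = (if 2 ≤ c then [r] else []) ++ rest.map Prod.fst := by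
      by_cases h2 : 2 ≤ c
      · have hn2 : c.toNat - 1 = (c.toNat - 2) + 1 := by omega
        rw [hT, hn2, List.replicate_succ]
        simp only [List.cons_append, pvNewOnes, List.not_mem_nil, if_false]
        rw [pvNewOnes_replicate_skip (by simp) _ _]
        rw [hM, pvNewOnes_expand rest [r] hndr (fun q hq => hc q (by simp [hq])) ?_]
        · simp [h2]
        · intro q hq
          simp only [List.mem_singleton]
          intro hqr
          exact hrnotin (hqr ▸ List.mem_map_of_mem hq)
      · have hn0 : c.toNat - 1 = 0 := by omega
        rw [hT, hn0, List.replicate_zero, List.nil_append, hM,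
          pvNewOnes_expand rest [] hndr (fun q hq => hc q (by simp [hq])) (by simp)]
        simp [h2]
    set s' := s ++ ((if 2 ≤ c then [r] else []) ++ rest.map Prod.fst).map
        (fun y => pvFrozen (r, y)) with hs'
    have hfrs' : ∀ y, y ∈ rest.map Prod.fst → pvFrozen (r, y) ∈ s' := by
      intro y hy
      rw [hs']
      refine List.mem_append.2 (Or.inr ?_)
      exact List.mem_map_of_mem (List.mem_append.2 (Or.inr hy))
    have hrr : 2 ≤ c.toNat - 1 → pvFrozen (r, r) ∈ s' := by
      intro hm
      have h2 : 2 ≤ c := by omega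
      rw [hs']
      refine List.mem_append.2 (Or.inr ?_)
      exact List.mem_map_of_mem (List.mem_append.2 (Or.inl (by simp [h2])))
    have hihs : ∀ a b : Int, a ∈ rest.map Prod.fst → b ∈ rest.map Prod.fst →
        pvFrozen (a, b) ∉ s' := by
      intro a b ha hb hin
      rw [hs'] at hin
      rcases List.mem_append.1 hin with h' | h'
      · exact hs a b (by simp [ha]) (by simp [hb]) h'
      · simp only [List.mem_map] at h'
        obtain ⟨y, _, hy⟩ := h'
        rcases pvFrozen_comp hy.symm with ⟨hra, _⟩ | ⟨_, hrb⟩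
        · exact hrnotin (hra ▸ ha)
        · exact hrnotin (hrb ▸ hb)
    rw [hexp]
    show pvDdl (T.map (fun y => (r, y)) ++ pvCombos2 T) s = _
    rw [pvDdl_map_block r T [] s (pvCombos2 T) hside, hNT]
    rw [show T = List.replicate (c.toNat - 1) r ++ M from hT]
    rw [pvDdl_combos_replicate (c.toNat - 1) M s' hrr
      (fun y hy => hfrs' y (hMkeys y hy))]
    rw [hM, ih s' hndr (fun q hq => hc q (by simp [hq])) hihs]
    show _ = ((if 2 ≤ c then [(r, r)] else []) ++ rest.map (fun q => (r, q.1))) ++ pvPairsB rest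
    rw [List.map_append, List.map_map]
    by_cases h2 : 2 ≤ c <;> simp [h2, Function.comp]


theorem pvExpand_filter (l : List (Int × Int)) :
    pvExpand l = pvExpand (l.filter (fun rc => decide (1 ≤ rc.2))) := by
  induction l with
  | nil => rfl
  | cons rc rest ih =>
    by_cases h : 1 ≤ rc.2
    · simp only [pvExpand, List.filter_cons, h, decide_true, List.flatMap_cons, if_true]
      rw [show List.flatMap (fun rc => List.replicate rc.2.toNat rc.1) rest = pvExpand rest from rfl,
        show List.flatMap (fun rc => List.replicate rc.2.toNat rc.1)
          (List.filter (fun rc => decide (1 ≤ rc.2)) rest) = pvExpand (List.filter (fun rc => decide (1 ≤ rc.2)) rest) from rfl, ih]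
    · have h0 : rc.2.toNat = 0 := by omega
      simp only [pvExpand, List.filter_cons, h, decide_false, List.flatMap_cons, if_false, h0,
        List.replicate_zero, List.nil_append, Bool.false_eq_true]
      exact ih

-- ===== VERDICT (by name: the statement is the Claim_ definition above) =====
theorem findPrevBoards_spec : Claim_equal_findPrevBoards := by
  intro board largest_row add_factor use_add_factor _ hpre
  unfold Spec_findPrevBoards findPrevBoards findPrevBoards_alt
  simp only [pvPhase3_foldl]
  have hknd : ((board.filter (fun rc => decide (1 ≤ rc.2))).map Prod.fst).Nodup :=
    hpre.sublist (List.Sublist.map _ List.filter_sublist)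
  have hcnt : ∀ rc ∈ board.filter (fun rc => decide (1 ≤ rc.2)), 1 ≤ rc.2 := by
    intro rc h
    simpa using (List.mem_filter.1 h).2
  have hemp : ∀ a b : Int,
      a ∈ (board.filter (fun rc => decide (1 ≤ rc.2))).map Prod.fst →
      b ∈ (board.filter (fun rc => decide (1 ≤ rc.2))).map Prod.fst →
      pvFrozen (a, b) ∉ PySem.Set.empty := by
    intro a b _ _ h
    simp [PySem.Set.empty] at h
  rw [pvConvert_eq]
  rw [show ({ items := board } : PySem.Dict Int Int).items = board from rfl]
  rw [pvExpand_filter]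
  rw [pvDdl_combos_main _ PySem.Set.empty hknd hcnt hemp]
  simp only [pvBump_eq, PySem.List.foldl_append_singleton_eq_map,
    PySem.List.foldl_append_eq_flatMap, List.nil_append]
  rfl
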